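-- pv_equiv track=rewrite | github.com/helmdubo/SCAFFOLD | dev/tools/CFTUV/model.py | _chain_axis_sign_from_vertices
-- ===== SOURCE A (Python) =====
-- def _chain_axis_sign_from_vertices(vert_indices: list[int], edge_indices: list[int]) -> int:
--     sequence = tuple(int(vert_index) for vert_index in vert_indices) or tuple(int(edge_index) for edge_index in edge_indices)
--     if not sequence:
--         return 1
--
--     reversed_sequence = tuple(reversed(sequence))
--     if sequence == reversed_sequence:
--         return 1
--     return 1 if sequence < reversed_sequence else -1
-- ===== SOURCE B (Python) =====
-- def _chain_axis_sign_from_vertices(vert_indices: list[int], edge_indices: list[int]) -> int: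
--     seq = [int(x) for x in vert_indices] or [int(x) for x in edge_indices]
--     i, j = 0, len(seq) - 1
--     while i < j:
--         if seq[i] != seq[j]:
--             return 1 if seq[i] < seq[j] else -1
--         i += 1
--         j -= 1
--     return 1
-- ===== Notes on version B (the rewrite author's own statement) =====
-- stated objective: alternative
-- what changed: Replaces materialising the reversed tuple and two whole-tuple comparisons (==, <) by a single two-pointer scan over the first half that returns the sign at the first mismatched symmetric pair.
import Mathlib
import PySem

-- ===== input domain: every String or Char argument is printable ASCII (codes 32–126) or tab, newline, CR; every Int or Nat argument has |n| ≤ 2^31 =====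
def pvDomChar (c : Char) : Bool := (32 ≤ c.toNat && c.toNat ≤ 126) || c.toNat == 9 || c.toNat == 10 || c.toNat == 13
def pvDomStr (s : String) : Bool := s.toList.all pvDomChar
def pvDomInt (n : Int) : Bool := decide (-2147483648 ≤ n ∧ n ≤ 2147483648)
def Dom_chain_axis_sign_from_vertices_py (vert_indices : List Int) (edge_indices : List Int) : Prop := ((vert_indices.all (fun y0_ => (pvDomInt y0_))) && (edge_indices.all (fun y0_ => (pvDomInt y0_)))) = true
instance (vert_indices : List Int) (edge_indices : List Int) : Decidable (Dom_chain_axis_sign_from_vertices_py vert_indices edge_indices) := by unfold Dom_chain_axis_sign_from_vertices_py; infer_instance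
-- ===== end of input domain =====

-- ===== PORT A =====
-- B differs from A: one two-pointer half-scan instead of materialising the reversed tuple and comparing twice.
-- Python tuple '<' on int tuples, step for step
def pyTupleLt : List Int → List Int → Bool
  | [], [] => false
  | [], _ :: _ => true
  | _ :: _, [] => false
  | a :: as_, b :: bs => if a < b then true else if b < a then false else pyTupleLt as_ bs

def chain_axis_sign_from_vertices_py (vert_indices : List Int) (edge_indices : List Int) : Int :=
  let sequence := if vert_indices.isEmpty then edge_indices else vert_indices
  if sequence = [] then 1
  else
    let reversed_sequence := sequence.reverse
    if sequence = reversed_sequence then 1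
    else if pyTupleLt sequence reversed_sequence then 1 else -1

-- ===== PORT B =====
-- the while loop of Source B: two pointers i < j over seq; fuel only makes the loop total
-- (accesses are always in range, so getD is exact for seq[i]/seq[j])
def halfScan (fuel : Nat) (seq : List Int) (i j : Nat) : Int :=
  match fuel with
  | 0 => 1
  | f + 1 =>
    if i < j then
      if seq.getD i 0 ≠ seq.getD j 0 then
        (if seq.getD i 0 < seq.getD j 0 then 1 else -1)
      else halfScan f seq (i + 1) (j - 1)
    else 1

def chain_axis_sign_from_vertices_py_alt (vert_indices : List Int) (edge_indices : List Int) : Int :=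
  let seq := if vert_indices.isEmpty then edge_indices else vert_indices
  halfScan seq.length seq 0 (seq.length - 1)

-- ===== PRECONDITION & SPEC =====
def Spec_chain_axis_sign_from_vertices_py (vert_indices : List Int) (edge_indices : List Int) (out : Int) : Prop := out = chain_axis_sign_from_vertices_py_alt vert_indices edge_indices
instance (vert_indices : List Int) (edge_indices : List Int) (out : Int) : Decidable (Spec_chain_axis_sign_from_vertices_py vert_indices edge_indices out) := by unfold Spec_chain_axis_sign_from_vertices_py; infer_instance

-- ===== CLAIM (what is proved, stated in full; the proofs are below) =====
def Claim_equal_chain_axis_sign_from_vertices_py : Prop := ∀ (vert_indices : List Int) (edge_indices : List Int), Dom_chain_axis_sign_from_vertices_py vert_indices edge_indices → Spec_chain_axis_sign_from_vertices_py vert_indices edge_indices (chain_axis_sign_from_vertices_py vert_indices edge_indices)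

-- ===== LEMMAS AND PROOFS =====

lemma pyTupleLt_self (c : List Int) : pyTupleLt c c = false := by
  induction c with
  | nil => rfl
  | cons a t ih => simp [pyTupleLt, ih]

lemma pyTupleLt_append_same (u : List Int) : ∀ (v c : List Int), u.length = v.length →
    pyTupleLt (u ++ c) (v ++ c) = pyTupleLt u v := by
  induction u with
  | nil =>
    intro v c h
    cases v with
    | nil => simpa [pyTupleLt] using pyTupleLt_self c
    | cons b bs => simp at h
  | cons a t ih =>
    intro v c h
    cases v with
    | nil => simp at h
    | cons b bs =>
      simp only [List.length_cons, Nat.add_right_cancel_iff] at h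
      simp [pyTupleLt, ih bs c h]

lemma halfScan_succ (f : Nat) (seq : List Int) (i j : Nat) :
    halfScan (f + 1) seq i j =
      if i < j then
        if seq.getD i 0 ≠ seq.getD j 0 then
          (if seq.getD i 0 < seq.getD j 0 then 1 else -1)
        else halfScan f seq (i + 1) (j - 1)
      else 1 := rfl

lemma halfScan_stop (f : Nat) (seq : List Int) (i j : Nat) (h : ¬ i < j) :
    halfScan f seq i j = 1 := by
  cases f with
  | zero => rfl
  | succ f => rw [halfScan_succ, if_neg h]

lemma halfScan_cons (a : Int) (u : List Int) : ∀ (f i j : Nat),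
    halfScan f (a :: u) (i + 1) (j + 1) = halfScan f u i j := by
  intro f
  induction f with
  | zero => intro i j; rfl
  | succ f ih =>
    intro i j
    rw [halfScan_succ, halfScan_succ, List.getD_cons_succ, List.getD_cons_succ]
    by_cases h : i < j
    · rw [if_pos (by omega : i + 1 < j + 1), if_pos h]
      by_cases he : u.getD i 0 = u.getD j 0
      · rw [if_neg (not_not_intro he), if_neg (not_not_intro he)]
        rw [show j + 1 - 1 = (j - 1) + 1 by omega]
        exact ih (i + 1) (j - 1)
      · rw [if_pos he, if_pos he]
    · rw [if_neg (by omega : ¬ i + 1 < j + 1), if_neg h]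

lemma halfScan_append (u c : List Int) : ∀ (f i j : Nat), j < u.length →
    halfScan f (u ++ c) i j = halfScan f u i j := by
  intro f
  induction f with
  | zero => intro i j _; rfl
  | succ f ih =>
    intro i j hj
    by_cases h : i < j
    · have hi : i < u.length := by omega
      rw [halfScan_succ, halfScan_succ,
        List.getD_append u c 0 i hi, List.getD_append u c 0 j hj,
        if_pos h, if_pos h]
      by_cases he : u.getD i 0 = u.getD j 0
      · rw [if_neg (not_not_intro he), if_neg (not_not_intro he)]
        exact ih (i + 1) (j - 1) (by omega)
      · rw [if_pos he, if_pos he]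
    · rw [halfScan_stop (f + 1) (u ++ c) i j h, halfScan_stop (f + 1) u i j h]

lemma halfScan_fuel (seq : List Int) : ∀ (f f' i j : Nat),
    j - i ≤ f → j - i ≤ f' → halfScan f seq i j = halfScan f' seq i j := by
  intro f
  induction f with
  | zero =>
    intro f' i j h _
    rw [halfScan_stop 0 seq i j (by omega), halfScan_stop f' seq i j (by omega)]
  | succ f ih =>
    intro f' i j h h'
    by_cases hij : i < j
    · cases f' with
      | zero => omega
      | succ f' =>
        rw [halfScan_succ, halfScan_succ, if_pos hij, if_pos hij]
        by_cases he : seq.getD i 0 = seq.getD j 0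
        · rw [if_neg (not_not_intro he), if_neg (not_not_intro he)]
          exact ih f' (i + 1) (j - 1) (by omega) (by omega)
        · rw [if_pos he, if_pos he]
    · rw [halfScan_stop (f + 1) seq i j hij, halfScan_stop f' seq i j hij]

lemma main_aux : ∀ (n : Nat) (s : List Int), s.length ≤ n →
    halfScan s.length s 0 (s.length - 1) =
      (if s = s.reverse then (1 : Int) else if pyTupleLt s s.reverse then 1 else -1) := by
  intro n
  induction n with
  | zero =>
    intro s hs
    have hnil : s = [] := List.length_eq_zero_iff.mp (Nat.le_zero.mp hs)
    subst hnil
    simp [halfScan]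
  | succ n ih =>
    intro s hs
    match s with
    | [] => simp [halfScan]
    | [a] => simp [halfScan]
    | a :: m =>
      rcases List.eq_nil_or_concat m with rfl | ⟨t, b, hm⟩
      · simp [halfScan]
      · rw [List.concat_eq_append] at hm
        subst hm
        have hlen : (a :: (t ++ [b])).length = t.length + 2 := by simp
        have hgetb : (a :: (t ++ [b])).getD (t.length + 1) 0 = b := by
          rw [List.getD_cons_succ, List.getD_append_right t [b] 0 t.length le_rfl]
          simp
        have hrev : (a :: (t ++ [b])).reverse = b :: (t.reverse ++ [a]) := by simp
        rw [hlen, show t.length + 2 - 1 = t.length + 1 from rfl,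
          halfScan_succ, if_pos (Nat.succ_pos t.length), List.getD_cons_zero, hgetb,
          Nat.add_sub_cancel]
        by_cases hab : a = b
        · subst hab
          rw [if_neg (not_not_intro rfl)]
          have h1 : halfScan (t.length + 1) (a :: (t ++ [a])) (0 + 1) t.length
              = halfScan t.length t 0 (t.length - 1) := by
            cases t with
            | nil => simp [halfScan]
            | cons x ts =>
              show halfScan (ts.length + 2) (a :: ((x :: ts) ++ [a])) (0 + 1) (ts.length + 1)
                  = halfScan (ts.length + 1) (x :: ts) 0 (ts.length + 1 - 1)
              rw [halfScan_cons a ((x :: ts) ++ [a]) (ts.length + 2) 0 ts.length,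
                halfScan_append (x :: ts) [a] (ts.length + 2) 0 ts.length (by simp),
                halfScan_fuel (x :: ts) (ts.length + 2) (ts.length + 1) 0 ts.length
                  (by omega) (by omega), Nat.add_sub_cancel]
          rw [h1, ih t (by simp at hs; omega)]
          have heq : (a :: (t ++ [a]) = (a :: (t ++ [a])).reverse) ↔ t = t.reverse := by
            rw [hrev]
            constructor
            · intro h
              injection h with _ h2
              exact (List.append_left_inj _).mp h2
            · intro h; rw [← h]
          have hlt : pyTupleLt (a :: (t ++ [a])) (a :: (t ++ [a])).reverse
              = pyTupleLt t t.reverse := by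
            rw [hrev]
            show (if a < a then true else if a < a then false
                else pyTupleLt (t ++ [a]) (t.reverse ++ [a])) = pyTupleLt t t.reverse
            rw [if_neg (lt_irrefl a), if_neg (lt_irrefl a)]
            exact pyTupleLt_append_same t t.reverse [a] (by simp)
          rw [hlt]
          by_cases htp : t = t.reverse
          · rw [if_pos htp, if_pos (heq.mpr htp)]
          · rw [if_neg htp, if_neg (fun h => htp (heq.mp h))]
        · rw [if_pos hab]
          have hne : a :: (t ++ [b]) ≠ (a :: (t ++ [b])).reverse := by
            rw [hrev]
            intro hcontra
            injection hcontra with h1 _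
            exact hab h1
          rw [if_neg hne, hrev,
            show pyTupleLt (a :: (t ++ [b])) (b :: (t.reverse ++ [a]))
              = (if a < b then true else if b < a then false
                  else pyTupleLt (t ++ [b]) (t.reverse ++ [a])) from rfl]
          rcases lt_trichotomy a b with h | h | h
          · rw [if_pos h, if_pos h]
            simp
          · exact absurd h hab
          · rw [if_neg (asymm h), if_neg (asymm h), if_pos h]
            simp
lemma main (s : List Int) :
    halfScan s.length s 0 (s.length - 1) =
      (if s = s.reverse then (1 : Int) else if pyTupleLt s s.reverse then 1 else -1) :=
  main_aux s.length s le_rfl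

-- ===== VERDICT (by name: the statement is the Claim_ definition above) =====
theorem chain_axis_sign_from_vertices_py_spec : Claim_equal_chain_axis_sign_from_vertices_py := by
  intro v e _
  unfold Spec_chain_axis_sign_from_vertices_py
  simp only [chain_axis_sign_from_vertices_py, chain_axis_sign_from_vertices_py_alt]
  generalize (if v.isEmpty then e else v) = s
  rw [main]
  by_cases h : s = []
  · subst h; simp
  · rw [if_neg h]
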